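-- pv_equiv track=rewrite | github.com/emmakofod/itsi | exercises/mandatory1_part1/svarfil.py | answer32
-- ===== SOURCE A (Python) =====
-- def answer32(data):
--     """Question 32: KEA has been infiltrated by thieves.
--     Luckily, they were chased away, and dropped what they stole.
--     Your task is to use the recorded log data to figure out what
--     floor and room number the thieves ended up.
--     ServiceDesk gave you the following legend:
--     ^ = +1 floor, v = -1 floor, < = -1 room number, > = +1 room number.
--     Answer with a tuple containing the floor and room number,
--     considering you start on floor 0 and room 0."""
--     floor = 0
--     room = 0
--
--     for char in data:
--         if char == "^":
--             floor += 1
--         elif char == "v":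
--             floor -= 1
--         elif char == "<":
--             room -= 1
--         elif char == ">":
--             room += 1
--
--     return (floor, room)
-- ===== SOURCE B (Python) =====
-- DELTA = {"^": (1, 0), "v": (-1, 0), "<": (0, -1), ">": (0, 1)}
--
-- def answer32(data):
--     # Divide and conquer: net movement of a log is the componentwise sum of
--     # the net movements of its two halves; a single character is a table lookup.
--     def go(lo, hi):
--         if hi - lo == 0:
--             return (0, 0)
--         if hi - lo == 1:
--             return DELTA.get(data[lo], (0, 0))
--         mid = (lo + hi) // 2
--         f1, r1 = go(lo, mid)
--         f2, r2 = go(mid, hi)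
--         return (f1 + f2, r1 + r2)
--     return go(0, len(data))
-- ===== Notes on version B (the rewrite author's own statement) =====
-- stated objective: alternative
-- what changed: Replaces the left-to-right if/elif accumulator loop with a recursive divide-and-conquer over index ranges: each half's net (floor, room) delta is computed independently and summed, single characters resolved through a lookup table.
import Mathlib
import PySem

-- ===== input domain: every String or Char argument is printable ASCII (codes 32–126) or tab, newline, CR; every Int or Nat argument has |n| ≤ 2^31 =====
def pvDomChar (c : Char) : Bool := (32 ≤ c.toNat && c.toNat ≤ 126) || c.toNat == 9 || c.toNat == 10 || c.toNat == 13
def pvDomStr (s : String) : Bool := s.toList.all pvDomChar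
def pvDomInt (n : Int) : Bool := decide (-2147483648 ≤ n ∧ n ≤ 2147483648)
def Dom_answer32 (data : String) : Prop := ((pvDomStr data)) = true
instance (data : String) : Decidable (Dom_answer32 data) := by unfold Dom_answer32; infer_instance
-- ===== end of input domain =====

-- B replaces the left-to-right if/elif loop with divide-and-conquer over index ranges
-- (halves computed independently and summed, single chars via a lookup table); alternative decomposition, same cost.

-- ===== PORT A =====
-- literal transliteration: accumulator (floor, room), branch per character in order
def answer32 (data : String) : Int × Int :=
  let fr := data.toList.foldl (fun (fr : Int × Int) char =>
    if char = '^' then (fr.1 + 1, fr.2)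
    else if char = 'v' then (fr.1 - 1, fr.2)
    else if char = '<' then (fr.1, fr.2 - 1)
    else if char = '>' then (fr.1, fr.2 + 1)
    else fr) (0, 0)
  (fr.1, fr.2)

-- ===== PORT B =====
-- DELTA module-level dict
def pvDELTA : PySem.Dict Char (Int × Int) :=
  PySem.Dict.ofList [('^', (1, 0)), ('v', (-1, 0)), ('<', (0, -1)), ('>', (0, 1))]

-- go(lo, hi): lo/hi are nonnegative Python ints bounded by len(data), so Nat with Nat./
-- is exact for (lo+hi)//2; data[lo] is in range on every call (lo < hi ≤ len), ported via pyGet?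
-- (none branch unreachable, returns the same (0,0) default Python's DELTA.get would).
def answer32Go (l : List Char) (lo hi : Nat) : Int × Int :=
  if hi - lo = 0 then (0, 0)
  else if hi - lo = 1 then
    match PySem.List.pyGet? l (lo : Int) with
    | some c => pvDELTA.getD c (0, 0)
    | none => (0, 0)
  else
    ((answer32Go l lo ((lo + hi) / 2)).1 + (answer32Go l ((lo + hi) / 2) hi).1,
     (answer32Go l lo ((lo + hi) / 2)).2 + (answer32Go l ((lo + hi) / 2) hi).2)
termination_by hi - lo
decreasing_by all_goals omega

def answer32_alt (data : String) : Int × Int :=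
  answer32Go data.toList 0 data.toList.length

-- ===== PRECONDITION & SPEC =====
def Spec_answer32 (data : String) (out : Int × Int) : Prop := out = answer32_alt data
instance (data : String) (out : Int × Int) : Decidable (Spec_answer32 data out) := by unfold Spec_answer32; infer_instance

-- ===== CLAIM (what is proved, stated in full; the proofs are below) =====
def Claim_equal_answer32 : Prop := ∀ (data : String), Dom_answer32 data → Spec_answer32 data (answer32 data)

-- ===== LEMMAS AND PROOFS =====
-- net movement of a character list, the common value both ports compute
def pvNet (l : List Char) : Int × Int :=
  ((l.count '^' : Int) - l.count 'v', (l.count '>' : Int) - l.count '<')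

theorem pvNet_append (a b : List Char) :
    pvNet (a ++ b) = (( pvNet a).1 + (pvNet b).1, (pvNet a).2 + (pvNet b).2) := by
  simp [pvNet, List.count_append]; omega

theorem pvNet_single (c : Char) :
    pvNet [c] = pvDELTA.getD c (0, 0) := by
  by_cases h1 : c = '^'
  · subst h1; decide
  · by_cases h2 : c = 'v'
    · subst h2; decide
    · by_cases h3 : c = '<'
      · subst h3; decide
      · by_cases h4 : c = '>'
        · subst h4; decide
        · simp [pvNet, h1, h2, h3, h4, pvDELTA, PySem.Dict.getD,
            PySem.Dict.ofList, PySem.Dict.update, PySem.Dict.empty,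
            PySem.Dict.insert, PySem.Dict.get?]
          have g1 : ('^' == c) = false := by simp [Ne.symm h1]
          have g2 : ('v' == c) = false := by simp [Ne.symm h2]
          have g3 : ('<' == c) = false := by simp [Ne.symm h3]
          have g4 : ('>' == c) = false := by simp [Ne.symm h4]
          simp [List.find?, g1, g2, g3, g4]

theorem answer32_foldl_counts (l : List Char) (f r : Int) :
    l.foldl (fun (fr : Int × Int) char =>
      if char = '^' then (fr.1 + 1, fr.2)
      else if char = 'v' then (fr.1 - 1, fr.2)
      else if char = '<' then (fr.1, fr.2 - 1)
      else if char = '>' then (fr.1, fr.2 + 1)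
      else fr) (f, r)
    = (f + l.count '^' - l.count 'v', r + l.count '>' - l.count '<') := by
  induction l generalizing f r with
  | nil => simp
  | cons c t ih =>
    simp only [List.foldl_cons, List.count_cons]
    by_cases h1 : c = '^'
    · simp [h1, ih]; omega
    · by_cases h2 : c = 'v'
      · simp [h2, ih]; omega
      · by_cases h3 : c = '<'
        · simp [h3, ih]; omega
        · by_cases h4 : c = '>'
          · simp [h4, ih]; omega
          · simp [h1, h2, h3, h4, ih]

-- the divide-and-conquer computes the net movement of the index segment [lo, hi)
theorem answer32Go_eq (l : List Char) (lo hi : Nat)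
    (hle : lo ≤ hi) (hhi : hi ≤ l.length) :
    answer32Go l lo hi = pvNet ((l.drop lo).take (hi - lo)) := by
  induction hn : hi - lo using Nat.strong_induction_on generalizing lo hi with
  | _ n ih =>
  rw [answer32Go]
  by_cases h0 : hi - lo = 0
  · have : n = 0 := by omega
    subst this
    simp [h0, pvNet]
  · by_cases h1 : hi - lo = 1
    · have hn1 : n = 1 := by omega
      subst hn1
      have hlt : lo < l.length := by omega
      rw [if_neg h0, if_pos h1, PySem.List.pyGet?_ofNat (xs := l) (n := lo) hlt]
      have hdrop : l.drop lo = l[lo] :: l.drop (lo + 1) := (List.getElem_cons_drop hlt).symm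
      rw [hdrop]
      simp only [List.take_succ_cons, List.take_zero, pvNet_single]
    · rw [if_neg h0, if_neg h1]
      have hmid1 : lo ≤ (lo + hi) / 2 := by omega
      have hmid2 : (lo + hi) / 2 ≤ hi := by omega
      rw [ih ((lo + hi) / 2 - lo) (by omega) lo ((lo + hi) / 2) hmid1 (by omega) rfl,
          ih (hi - (lo + hi) / 2) (by omega) ((lo + hi) / 2) hi hmid2 hhi rfl]
      have hsplit : (l.drop lo).take (hi - lo)
          = (l.drop lo).take ((lo + hi) / 2 - lo) ++ (l.drop ((lo + hi) / 2)).take (hi - (lo + hi) / 2) := by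
        have : l.drop ((lo + hi) / 2) = (l.drop lo).drop ((lo + hi) / 2 - lo) := by
          rw [List.drop_drop]; congr 1; omega
        rw [this, ← List.take_add]; congr 1; omega
      rw [hn] at hsplit
      rw [hsplit, pvNet_append]

-- ===== VERDICT (by name: the statement is the Claim_ definition above) =====
theorem answer32_spec : Claim_equal_answer32 := by
  intro data _
  unfold Spec_answer32 answer32 answer32_alt
  rw [answer32Go_eq data.toList 0 data.toList.length (Nat.zero_le _) le_rfl]
  simp only [List.drop_zero, Nat.sub_zero, List.take_length, answer32_foldl_counts, pvNet]
  simp
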